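-- pv_equiv track=rewrite | github.com/Jjschwartz/NetworkAttackSimulator | cyber_attack_simulator/envs/pomdp_generator.py | generate_service_configs
-- ===== SOURCE A (Python) =====
-- def generate_service_configs(n):
--     """
--     Recursively generate list of all possible configurations of n services, where:
--
--     N.B First permutation in list is always the all True permutation and final
--     permutation in list is always the all False permutation.
--
--     perms[1] = [True, True, ..., True]
--     perms[-1] = [False, False, ..., False]
--
--     Arguments:
--         int n : number of services
--
--     Returns:
--         list[list[bool]] perms : list of list of bools of all possible configurations of n services
--     """
--     # base cases
--     if n <= 0:
--         return []
--     if n == 1: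
--         return [[True], [False]]
--
--     perms = []
--     for p in generate_service_configs(n - 1):
--         perms.append([True] + p)
--         perms.append([False] + p)
--     return perms
-- ===== SOURCE B (Python) =====
-- def generate_service_configs(n):
--     if n <= 0:
--         return []
--     return [[(i >> j) & 1 == 0 for j in range(n)] for i in range(2 ** n)]
-- ===== Notes on version B (the rewrite author's own statement) =====
-- stated objective: alternative
-- what changed: Replaced the recursion-and-rebuild (recurse to n-1, prepend True/False to every sublist) by a direct bit-counting enumeration: config i has entry j equal to ((i >> j) & 1 == 0), producing the same order (all-True first, all-False last) with no recursion and no repeated list copying.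
import Mathlib
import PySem

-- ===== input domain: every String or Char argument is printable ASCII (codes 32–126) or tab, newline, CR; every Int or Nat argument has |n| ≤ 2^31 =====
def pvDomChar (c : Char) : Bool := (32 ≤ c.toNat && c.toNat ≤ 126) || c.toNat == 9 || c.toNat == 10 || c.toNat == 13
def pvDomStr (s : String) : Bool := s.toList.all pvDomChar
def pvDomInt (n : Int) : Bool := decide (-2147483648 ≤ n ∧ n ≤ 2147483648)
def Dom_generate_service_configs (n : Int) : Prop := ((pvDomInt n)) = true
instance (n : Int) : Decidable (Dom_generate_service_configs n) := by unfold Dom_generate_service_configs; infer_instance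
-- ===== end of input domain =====

-- B replaces A's recursion-and-rebuild with a direct bit-counting enumeration (same order, same values); objective: alternative decomposition.


-- ===== PORT A =====
-- literal port of A: recursion on n, each level appends [True]+p then [False]+p for every p of the level below
def generate_service_configs (n : Int) : List (List Bool) :=
  if n ≤ 0 then []
  else if n = 1 then [[true], [false]]
  else
    (generate_service_configs (n - 1)).foldl
      (fun perms p => perms ++ [true :: p, false :: p]) []
termination_by n.toNat
decreasing_by omega

-- ===== PORT B =====
-- literal port of B: [[(i >> j) & 1 == 0 for j in range(n)] for i in range(2 ** n)];
-- 2 ** n is ported as 2 ^ n.toNat (exact: this branch has n > 0), and i from range(2 ** n)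
-- is nonnegative so (i >> j) is the Int shift with shift amount j.toNat (j ≥ 0 from range(n)).
def generate_service_configs_alt (n : Int) : List (List Bool) :=
  if n ≤ 0 then []
  else
    (PySem.List.pyRange 0 ((2 : Int) ^ n.toNat) 1).map (fun i =>
      (PySem.List.pyRange 0 n 1).map (fun j =>
        decide (PySem.Int.band (i >>> j.toNat) 1 = 0)))

-- ===== PRECONDITION & SPEC =====
-- Pre_ excludes large n, where A's recursion has depth n and raises RecursionError under
-- CPython's default recursion limit (the bound 900 is safely below that limit; A cannot
-- return for any n anywhere near it, since its result has 2^n entries).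
def Pre_generate_service_configs (n : Int) : Prop := n ≤ 900
instance (n : Int) : Decidable (Pre_generate_service_configs n) := by unfold Pre_generate_service_configs; infer_instance
def pvWitness_generate_service_configs : Int := (3)
def Spec_generate_service_configs (n : Int) (out : List (List Bool)) : Prop := out = generate_service_configs_alt n
instance (n : Int) (out : List (List Bool)) : Decidable (Spec_generate_service_configs n out) := by unfold Spec_generate_service_configs; infer_instance

-- ===== CLAIM (what is proved, stated in full; the proofs are below) =====
def Claim_equal_generate_service_configs : Prop := ∀ (n : Int), Dom_generate_service_configs n → Pre_generate_service_configs n → Spec_generate_service_configs n (generate_service_configs n)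

-- ===== LEMMAS AND PROOFS =====

-- one row of B's table, on the Nat side: entry j of config i
def pvRow (i m : Nat) : List Bool :=
  (List.range m).map (fun j => decide (i / 2 ^ j % 2 = 0))

-- mapping over range(2*N) splits into even/odd pairs
theorem pvRange_two_mul (N : Nat) (g : Nat → List Bool) :
    (List.range (2 * N)).map g = (List.range N).flatMap (fun k => [g (2 * k), g (2 * k + 1)]) := by
  induction N with
  | zero => simp
  | succ N ih =>
      rw [Nat.mul_succ, List.range_succ, List.range_succ, List.range_succ]
      simp [ih]

theorem pvRow_succ (i m : Nat) :
    pvRow i (m + 1) = decide (i % 2 = 0) :: pvRow (i / 2) m := by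
  unfold pvRow
  rw [List.range_succ_eq_map]
  simp [List.map_map, Function.comp_def, pow_succ, Nat.div_div_eq_div_mul, Nat.mul_comm]

-- A's recursion equals B's bit-table, for every positive service count m + 1
theorem pvA_eq_table (m : Nat) :
    generate_service_configs ((m : Int) + 1)
      = (List.range (2 ^ (m + 1))).map (fun i => pvRow i (m + 1)) := by
  induction m with
  | zero =>
      rw [generate_service_configs]
      decide
  | succ m ih =>
      rw [generate_service_configs]
      push_cast
      have h0 : ¬ ((m : Int) + 1 + 1 ≤ 0) := by omega
      have h1 : ((m : Int) + 1 + 1) ≠ 1 := by omega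
      rw [if_neg h0, if_neg h1]
      have hrec : (m : Int) + 1 + 1 - 1 = (m : Int) + 1 := by ring
      rw [hrec, ih, ← List.flatMap_eq_foldl]
      have hpow : 2 ^ (m + 1 + 1) = 2 * 2 ^ (m + 1) := by ring
      rw [hpow, pvRange_two_mul]
      simp only [List.flatMap_map]
      refine List.flatMap_congr (fun k _ => ?_)
      have he : pvRow (2 * k) (m + 1 + 1) = true :: pvRow k (m + 1) := by
        rw [pvRow_succ]
        simp [Nat.mul_div_cancel_left k (by norm_num : 0 < 2), Nat.mul_mod_right]
      have ho : pvRow (2 * k + 1) (m + 1 + 1) = false :: pvRow k (m + 1) := by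
        rw [pvRow_succ]
        have : (2 * k + 1) / 2 = k := by omega
        rw [this]
        simp
      rw [he, ho]

-- B's port, unfolded to the Nat-side table, for positive n
theorem pvB_eq_table (m : Nat) (hm : 0 < m) :
    generate_service_configs_alt (m : Int)
      = (List.range (2 ^ m)).map (fun i => pvRow i m) := by
  unfold generate_service_configs_alt
  rw [if_neg (by omega : ¬ (m : Int) ≤ 0)]
  have h2 : ((2 : Int) ^ ((m : Int)).toNat) = ((2 ^ m : Nat) : Int) := by simp
  rw [h2, PySem.List.pyRange_zero_natCast, PySem.List.pyRange_zero_natCast]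
  simp only [Int.toNat_natCast, List.map_map, Function.comp_def]
  refine List.map_congr_left (fun i _ => ?_)
  refine List.map_congr_left (fun j _ => ?_)
  have hb : PySem.Int.band (((i >>> j : Nat) : Int)) 1 = ((i >>> j &&& 1 : Nat) : Int) := by
    simpa using PySem.Int.band_natCast (i >>> j) 1
  show decide (PySem.Int.band ((i : Int) >>> ((j : Int)).toNat) 1 = 0) = decide (i / 2 ^ j % 2 = 0)
  rw [Int.toNat_natCast, show ((i : Int) >>> j) = ((i >>> j : Nat) : Int) by
    simp [Int.natCast_shiftRight], hb]
  simp [Nat.shiftRight_eq_div_pow, Nat.and_one_is_mod]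
  rw [show ((2 : Int) ^ j) = ((2 ^ j : Nat) : Int) by push_cast; ring, ← Int.natCast_ediv]
  omega

-- ===== VERDICT (by name: the statement is the Claim_ definition above) =====
theorem generate_service_configs_spec : Claim_equal_generate_service_configs := by
  intro n _ _
  unfold Spec_generate_service_configs
  by_cases hn : n ≤ 0
  · rw [generate_service_configs, if_pos hn]
    unfold generate_service_configs_alt
    rw [if_pos hn]
  · obtain ⟨m, hm⟩ : ∃ m : Nat, n = (m : Int) + 1 := ⟨(n - 1).toNat, by omega⟩
    have hc : n = ((m + 1 : Nat) : Int) := by push_cast; omega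
    rw [hc, pvB_eq_table (m + 1) (by omega)]
    rw [show ((m + 1 : Nat) : Int) = (m : Int) + 1 by push_cast; ring, pvA_eq_table]
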